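-- pv_equiv track=rewrite | github.com/Phucptit2003/Python-PTIT | 27-7.py | check
-- ===== SOURCE A (Python) =====
-- def check(b,c,h):
--     cnt=2
--     b-=2
--     c1=False
--     c2=False
--     if b>0:
--         while c>0:
--             c-=1
--             b-=1
--             cnt+=2
--             if b==0:
--                 cnt+=1
--                 c1=True
--                 break
--         if c1==False:
--             while h>0:
--                 if h==1 and b>0:
--                     cnt+=1
--                     break
--                 elif b==0 and h>0:
--                     cnt+=1
--                     break
--                 h-=1
--                 b-=1
--                 cnt+=2
--     else:
--         cnt+=1
--     return cnt
-- ===== SOURCE B (Python) =====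
-- def check(b, c, h):
--     b -= 2
--     if b <= 0:
--         return 3
--     c = max(c, 0)
--     if c >= b:
--         return 2 * b + 3
--     if h <= 0:
--         return 2 + 2 * c
--     return 3 + 2 * c + 2 * min(h - 1, b - c)
-- ===== Notes on version B (the rewrite author's own statement) =====
-- stated objective: faster
-- what changed: Replaced A's two decrementing while-loops (counting up cnt step by step) with a closed-form case analysis computing the count directly with max/min arithmetic.
import Mathlib
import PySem

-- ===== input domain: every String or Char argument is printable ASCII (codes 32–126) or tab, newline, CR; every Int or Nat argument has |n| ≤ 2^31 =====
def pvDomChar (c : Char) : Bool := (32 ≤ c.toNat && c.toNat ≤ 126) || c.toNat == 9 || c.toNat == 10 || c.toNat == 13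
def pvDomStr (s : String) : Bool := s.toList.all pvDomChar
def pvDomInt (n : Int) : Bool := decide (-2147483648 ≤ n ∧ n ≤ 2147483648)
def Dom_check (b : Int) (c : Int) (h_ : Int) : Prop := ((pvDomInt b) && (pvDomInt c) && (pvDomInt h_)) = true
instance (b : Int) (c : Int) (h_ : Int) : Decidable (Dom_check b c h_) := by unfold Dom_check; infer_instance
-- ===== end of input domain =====

-- B replaces A's two decrementing while-loops by O(1) closed-form case arithmetic (asymptotically faster).

-- ===== PORT A =====
-- first while-loop of A (c -= 1; b -= 1; cnt += 2; break with c1=True when b hits 0): returns (c, b, cnt, c1)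
def checkLoop1 (c b cnt : Int) : Int × Int × Int × Bool :=
  if hc : c > 0 then
    if b - 1 = 0 then (c - 1, b - 1, cnt + 2 + 1, true)
    else checkLoop1 (c - 1) (b - 1) (cnt + 2)
  else (c, b, cnt, false)
termination_by c.toNat
decreasing_by simp_all

-- second while-loop of A: returns cnt
def checkLoop2 (h b cnt : Int) : Int :=
  if hh : h > 0 then
    if h = 1 ∧ b > 0 then cnt + 1
    else if b = 0 ∧ h > 0 then cnt + 1
    else checkLoop2 (h - 1) (b - 1) (cnt + 2)
  else cnt
termination_by h.toNat
decreasing_by simp_all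

def check (b : Int) (c : Int) (h_ : Int) : Int :=
  if b - 2 > 0 then
    match checkLoop1 c (b - 2) 2 with
    | (_, b', cnt', c1) => if c1 = false then checkLoop2 h_ b' cnt' else cnt'
  else 2 + 1

-- ===== PORT B =====
def check_alt (b : Int) (c : Int) (h_ : Int) : Int :=
  if b - 2 ≤ 0 then 3
  else if max c 0 ≥ b - 2 then 2 * (b - 2) + 3
  else if h_ ≤ 0 then 2 + 2 * max c 0
  else 3 + 2 * max c 0 + 2 * min (h_ - 1) (b - 2 - max c 0)

-- ===== PRECONDITION & SPEC =====
def Spec_check (b : Int) (c : Int) (h_ : Int) (out : Int) : Prop := out = check_alt b c h_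
instance (b : Int) (c : Int) (h_ : Int) (out : Int) : Decidable (Spec_check b c h_ out) := by unfold Spec_check; infer_instance

-- ===== CLAIM (what is proved, stated in full; the proofs are below) =====
def Claim_equal_check : Prop := ∀ (b : Int) (c : Int) (h_ : Int), Dom_check b c h_ → Spec_check b c h_ (check b c h_)

-- ===== LEMMAS AND PROOFS =====

theorem checkLoop1_eq (c b cnt : Int) (hb : 0 < b) :
    checkLoop1 c b cnt =
      if b ≤ c then (c - b, 0, cnt + 2 * b + 1, true)
      else if c ≤ 0 then (c, b, cnt, false)
      else (0, b - c, cnt + 2 * c, false) := by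
  induction hn : c.toNat using Nat.strong_induction_on generalizing c b cnt with
  | _ n ih =>
    rw [checkLoop1.eq_def]
    by_cases hc : c > 0
    · rw [dif_pos hc]
      by_cases hb1 : b - 1 = 0
      · rw [if_pos hb1, if_pos (by omega : b ≤ c)]
        simp only [Prod.mk.injEq, and_true]; omega
      · rw [if_neg hb1,
            ih (c - 1).toNat (by omega) (c - 1) (b - 1) (cnt + 2) (by omega) rfl]
        by_cases hbc : b ≤ c
        · rw [if_pos (by omega : b - 1 ≤ c - 1), if_pos hbc]
          simp only [Prod.mk.injEq, and_true, true_and]; omega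
        · rw [if_neg (by omega : ¬ b - 1 ≤ c - 1), if_neg hbc,
              if_neg (by omega : ¬ c ≤ 0)]
          by_cases hc1 : c - 1 ≤ 0
          · rw [if_pos hc1]
            simp only [Prod.mk.injEq, and_true]; omega
          · rw [if_neg hc1]
            simp only [Prod.mk.injEq, and_true, true_and]; omega
    · rw [dif_neg hc, if_neg (by omega : ¬ b ≤ c), if_pos (by omega : c ≤ 0)]

theorem checkLoop2_eq (h b cnt : Int) (hb : 0 ≤ b) :
    checkLoop2 h b cnt = if h ≤ 0 then cnt else cnt + 2 * min (h - 1) b + 1 := by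
  induction hn : h.toNat using Nat.strong_induction_on generalizing h b cnt with
  | _ n ih =>
    rw [checkLoop2.eq_def]
    by_cases hh : h > 0
    · rw [dif_pos hh, if_neg (by omega : ¬ h ≤ 0)]
      by_cases h1 : h = 1 ∧ b > 0
      · rw [if_pos h1]
        obtain ⟨e1, e2⟩ := h1
        omega
      · rw [if_neg h1]
        by_cases h2 : b = 0 ∧ h > 0
        · rw [if_pos h2]
          obtain ⟨e1, _⟩ := h2
          omega
        · rw [if_neg h2]
          have hb' : 0 < b := by
            rcases not_and_or.mp h2 with h' | h' <;> omega
          have hne1 : h ≠ 1 := fun e => absurd ⟨e, hb'⟩ h1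
          rw [ih (h - 1).toNat (by omega) (h - 1) (b - 1) (cnt + 2) (by omega) rfl,
              if_neg (by omega : ¬ h - 1 ≤ 0)]
          omega
    · rw [dif_neg hh, if_pos (by omega : h ≤ 0)]

-- ===== VERDICT (by name: the statement is the Claim_ definition above) =====
theorem check_spec : Claim_equal_check := by
  intro b c h_ _
  unfold Spec_check check check_alt
  by_cases hb : b - 2 > 0
  · rw [if_pos hb, if_neg (by omega : ¬ b - 2 ≤ 0),
        checkLoop1_eq c (b - 2) 2 (by omega)]
    by_cases hcb : b - 2 ≤ c
    · rw [if_pos hcb, if_pos (by omega : max c 0 ≥ b - 2)]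
      norm_num
      omega
    · rw [if_neg hcb, if_neg (by omega : ¬ max c 0 ≥ b - 2)]
      by_cases hc0 : c ≤ 0
      · rw [if_pos hc0]
        norm_num
        rw [checkLoop2_eq h_ (b - 2) 2 (by omega)]
        split_ifs <;> omega
      · rw [if_neg hc0]
        norm_num
        rw [checkLoop2_eq h_ (b - 2 - c) (2 + 2 * c) (by omega)]
        split_ifs <;> omega
  · rw [if_neg hb, if_pos (by omega : b - 2 ≤ 0)]
    norm_num
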